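-- pv_equiv track=rewrite | github.com/taufderl/google-code-jam-2016 | qualification/D.py | transform_bad
-- ===== SOURCE A (Python) =====
-- L_CHAR='0'
--
-- G_CHAR='1'
--
-- def transform_bad(original, C):
--   art = list(original)
--   K = len(art)
--   for c in range(1,C):
--     tmp = []
--     for i in range(len(art)):
--       if art[i] == L_CHAR:
--         tmp.extend(list(original))
--       elif art[i] == G_CHAR:
--         tmp.extend(K*[G_CHAR])
--     art = tmp
--   return ''.join(art)
-- ===== SOURCE B (Python) =====
-- L_CHAR = '0'
-- G_CHAR = '1'
--
-- def transform_bad(original, C):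
--   # Bottom-up DP: E is the full expansion of `original` at depth s; each level
--   # substitutes the previous E for '0' and a closed-form run of K**s ones for '1',
--   # folding only over the K characters of `original` instead of the whole string.
--   K = len(original)
--   r = C - 1
--   if r < 0:
--     r = 0
--   has_one = G_CHAR in original
--   E = original
--   for s in range(r):
--     run = G_CHAR * K ** (s + 1) if has_one else ''
--     E = ''.join(run if c == G_CHAR else (E if c == L_CHAR else '')
--                 for c in original)
--   return E
-- ===== Notes on version B (the rewrite author's own statement) =====
-- stated objective: alternative
-- what changed: Replaces A's level-by-level rescan of the whole growing string with bottom-up dynamic programming: each level is built by folding only over the K characters of the original, substituting the previous level's expansion for '0' and a closed-form run of K**s ones for '1'.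
import Mathlib
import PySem

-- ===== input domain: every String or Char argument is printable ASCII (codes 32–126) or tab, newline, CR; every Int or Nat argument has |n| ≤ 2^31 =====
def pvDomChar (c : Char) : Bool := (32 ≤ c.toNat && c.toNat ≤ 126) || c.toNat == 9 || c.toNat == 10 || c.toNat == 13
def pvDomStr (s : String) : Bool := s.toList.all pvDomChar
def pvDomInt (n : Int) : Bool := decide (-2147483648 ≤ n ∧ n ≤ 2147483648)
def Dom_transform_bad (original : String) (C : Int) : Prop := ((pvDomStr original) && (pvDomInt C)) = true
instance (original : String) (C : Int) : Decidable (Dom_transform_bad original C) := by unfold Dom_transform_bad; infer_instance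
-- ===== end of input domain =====

-- B (alternative): depth-first recursive expansion of each character with a closed form for '1',
-- instead of A's level-by-level rebuild of the whole string.

-- ===== PORT A =====
-- literal port of A: art = list(original); for c in range(1,C): rebuild art index by index; join
def transform_bad (original : String) (C : Int) : String :=
  let art0 := original.toList
  let K := art0.length
  let art := (PySem.List.pyRange 1 C 1).foldl (fun art _ =>
    (List.range art.length).foldl (fun tmp i =>
      let ch := art.getD i ' '   -- i drawn from range(len(art)): always in range, exact
      if ch = '0' then tmp ++ art0
      else if ch = '1' then tmp ++ List.replicate K '1'
      else tmp) []) art0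
  String.ofList art

-- ===== PORT B =====
-- bottom-up DP from Source B: E = expansion at depth s, rebuilt each level by folding over `orig`;
-- (C-1).toNat is exactly Source B's 'r = C - 1; if r < 0: r = 0'
def transform_bad_alt (original : String) (C : Int) : String :=
  let orig := original.toList
  let K := orig.length
  let r := (C - 1).toNat
  let hasOne := orig.contains '1'
  let E := (List.range r).foldl (fun E s =>
    let run := if hasOne then List.replicate (K ^ (s + 1)) '1' else []
    orig.flatMap (fun c => if c = '1' then run else if c = '0' then E else [])) orig
  String.ofList E

-- ===== PRECONDITION & SPEC =====
def Spec_transform_bad (original : String) (C : Int) (out : String) : Prop := out = transform_bad_alt original C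
instance (original : String) (C : Int) (out : String) : Decidable (Spec_transform_bad original C out) := by unfold Spec_transform_bad; infer_instance

-- ===== CLAIM (what is proved, stated in full; the proofs are below) =====
def Claim_equal_transform_bad : Prop := ∀ (original : String) (C : Int), Dom_transform_bad original C → Spec_transform_bad original C (transform_bad original C)

-- ===== LEMMAS AND PROOFS =====

-- full depth-r expansion of one character (proof-level characterisation shared by both ports)
def pvExpandB (orig : List Char) (K : Nat) (ch : Char) : Nat → List Char
  | 0 => [ch]
  | r + 1 =>
    if ch = '1' then List.replicate (K ^ (r + 1)) '1'
    else if ch = '0' then orig.flatMap (fun c => pvExpandB orig K c r)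
    else []

-- one level of A's rebuild, as a per-character map
def pvStepF (orig : List Char) (K : Nat) (ch : Char) : List Char :=
  if ch = '0' then orig else if ch = '1' then List.replicate K '1' else []

-- A's inner index loop is a flatMap of pvStepF
theorem pv_inner_eq_flatMap (orig : List Char) (K : Nat) :
    ∀ (art acc : List Char),
      (List.range art.length).foldl (fun tmp i =>
        let ch := art.getD i ' '
        if ch = '0' then tmp ++ orig
        else if ch = '1' then tmp ++ List.replicate K '1'
        else tmp) acc = acc ++ art.flatMap (pvStepF orig K) := by
  intro art
  induction art with
  | nil => intro acc; simp
  | cons c cs ih =>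
    intro acc
    simp only [List.length_cons, List.range_succ_eq_map, List.foldl_cons, List.foldl_map,
      List.getD_cons_succ, List.getD_cons_zero, List.flatMap_cons]
    rw [ih]
    unfold pvStepF
    split_ifs <;> simp

-- A's outer loop ignores the loop variable: it is n-fold application of the step
def pvIterA (orig : List Char) (K : Nat) (art : List Char) : Nat → List Char
  | 0 => art
  | n + 1 => pvIterA orig K (art.flatMap (pvStepF orig K)) n

theorem pv_foldl_const (orig : List Char) (K : Nat) :
    ∀ (l : List Int) (art : List Char),
      l.foldl (fun art _ =>
        (List.range art.length).foldl (fun tmp i =>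
          let ch := art.getD i ' '
          if ch = '0' then tmp ++ orig
          else if ch = '1' then tmp ++ List.replicate K '1'
          else tmp) []) art = pvIterA orig K art l.length := by
  intro l
  induction l with
  | nil => intro art; rfl
  | cons x xs ih =>
    intro art
    simp only [List.foldl_cons, List.length_cons]
    rw [pv_inner_eq_flatMap, ih]
    rfl

-- pvExpandB on '1' is the closed form: K^r ones
theorem pv_expand_one (orig : List Char) (K r : Nat) :
    pvExpandB orig K '1' r = List.replicate (K ^ r) '1' := by
  cases r with
  | zero => simp [pvExpandB]
  | succ m => simp [pvExpandB]

theorem pv_flatMap_replicate_one (orig : List Char) (K r : Nat) :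
    ∀ n : Nat, (List.replicate n '1').flatMap (fun c => pvExpandB orig K c r)
      = List.replicate (n * K ^ r) '1' := by
  intro n
  induction n with
  | zero => simp
  | succ m ih =>
    simp only [List.replicate_succ, List.flatMap_cons, ih, pv_expand_one]
    rw [← List.replicate_add]
    congr 1
    ring

-- one step of pvStepF followed by depth-r expansion is depth-(r+1) expansion
theorem pv_expand_succ (orig : List Char) (K : Nat) (ch : Char) (r : Nat) :
    pvExpandB orig K ch (r + 1) = (pvStepF orig K ch).flatMap (fun c => pvExpandB orig K c r) := by
  by_cases h1 : ch = '1'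
  · subst h1
    rw [pv_expand_one]
    simp only [pvStepF, if_neg (by decide : ('1' : Char) ≠ '0'), if_true,
      pv_flatMap_replicate_one]
    congr 1
    rw [pow_succ, Nat.mul_comm]
  · by_cases h0 : ch = '0'
    · subst h0
      simp [pvExpandB, pvStepF, h1]
    · simp [pvExpandB, pvStepF, h0, h1]

theorem pv_iter_eq_flatMap_expand (orig : List Char) (K : Nat) :
    ∀ (n : Nat) (art : List Char),
      pvIterA orig K art n = art.flatMap (fun c => pvExpandB orig K c n) := by
  intro n
  induction n with
  | zero => intro art; simp [pvIterA, pvExpandB]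
  | succ m ih =>
    intro art
    show pvIterA orig K (art.flatMap (pvStepF orig K)) m = _
    rw [ih, List.flatMap_assoc]
    congr 1
    funext c
    exact (pv_expand_succ orig K c m).symm

theorem pv_pyRange_len (C : Int) : (PySem.List.pyRange 1 C 1).length = (C - 1).toNat := by
  simp [PySem.List.length_pyRange_one]

-- B's bottom-up loop computes the same flatMap of full expansions
theorem pv_alt_loop (orig : List Char) :
    ∀ r : Nat,
      (List.range r).foldl (fun E s =>
        let run := if orig.contains '1' then List.replicate (orig.length ^ (s + 1)) '1' else []
        orig.flatMap (fun c => if c = '1' then run else if c = '0' then E else [])) orig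
      = orig.flatMap (fun c => pvExpandB orig orig.length c r) := by
  intro r
  induction r with
  | zero => simp [pvExpandB]
  | succ m ih =>
    rw [List.range_succ, List.foldl_append, List.foldl_cons, List.foldl_nil, ih]
    by_cases h1 : orig.contains '1'
    · simp only [if_pos h1]
      apply List.flatMap_congr
      intro c _
      rw [pv_expand_succ]
      unfold pvStepF
      by_cases hc1 : c = '1'
      · subst hc1
        simp [pv_flatMap_replicate_one, pow_succ, Nat.mul_comm]
      · by_cases hc0 : c = '0'
        · subst hc0; simp [hc1]
        · simp [hc1, hc0]
    · apply List.flatMap_congr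
      intro c hc
      have hcne : c ≠ '1' := by
        intro h; exact h1 (List.contains_iff_mem.mpr (h ▸ hc))
      rw [pv_expand_succ]
      unfold pvStepF
      by_cases hc0 : c = '0'
      · subst hc0; simp [hcne]
      · simp [hcne, hc0]

-- ===== VERDICT (by name: the statement is the Claim_ definition above) =====
theorem transform_bad_spec : Claim_equal_transform_bad := by
  intro original C _
  unfold Spec_transform_bad transform_bad transform_bad_alt
  simp only []
  rw [pv_foldl_const, pv_pyRange_len, pv_iter_eq_flatMap_expand, pv_alt_loop]
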